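-- pv_equiv track=rewrite | github.com/terentievamarie/geekhub_homeworks | HT_08/task_5.py | quantity
-- ===== SOURCE A (Python) =====
-- def quantity(input_string):
--     input_string = input_string.lower()
--     symbol_count = {}
--
--     for char in input_string:
--         if char.isalnum():
--             if char in symbol_count:
--                 symbol_count[char] += 1
--             else:
--                 symbol_count[char] = 1
--
--     for char, count in symbol_count.items():
--         if count > 1:
--             yield char, count
-- ===== SOURCE B (Python) =====
-- def quantity(input_string):
--     # Remove-and-recurse worklist: repeatedly take the first remaining char,
--     # partition the rest into equals (counted) and others (kept for later rounds).
--     chars = [c for c in input_string.lower() if c.isalnum()]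
--     while chars:
--         c = chars[0]
--         rest = chars[1:]
--         same = [x for x in rest if x == c]
--         chars = [x for x in rest if x != c]
--         if same:
--             yield c, 1 + len(same)
-- ===== Notes on version B (the rewrite author's own statement) =====
-- stated objective: alternative
-- what changed: A builds a frequency dict in one pass and then filters its items; B uses a remove-and-recurse worklist: it repeatedly takes the first remaining alphanumeric char, partitions the remaining list into occurrences of that char (counted) and the rest (processed in later rounds), never maintaining a dict or counter.
import Mathlib
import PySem

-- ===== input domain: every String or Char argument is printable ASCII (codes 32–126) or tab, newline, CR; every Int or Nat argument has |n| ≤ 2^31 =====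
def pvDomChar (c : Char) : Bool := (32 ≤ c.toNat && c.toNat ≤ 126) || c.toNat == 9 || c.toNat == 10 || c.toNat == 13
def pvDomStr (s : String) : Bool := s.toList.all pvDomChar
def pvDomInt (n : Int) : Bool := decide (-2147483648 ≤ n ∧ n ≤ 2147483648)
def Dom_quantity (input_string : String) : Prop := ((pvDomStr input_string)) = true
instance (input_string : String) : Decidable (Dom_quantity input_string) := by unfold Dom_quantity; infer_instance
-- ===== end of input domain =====

-- B replaces A's single-pass frequency dict by a remove-and-recurse worklist that repeatedly partitions the remaining chars (alternative decomposition, same results).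

-- ===== PORT A =====
-- single pass building a dict char -> count, then emit items with count > 1
def quantity (input_string : String) : List (String × Int) :=
  let lowered := (PySem.Str.lower input_string).toList
  let symbol_count : PySem.Dict Char Int :=
    lowered.foldl
      (fun d c =>
        if PySem.Chars.isalnum c then
          if d.contains c then d.insert c (d.getD c 0 + 1)
          else d.insert c 1
        else d)
      PySem.Dict.empty
  symbol_count.items.foldl
    (fun acc p => if 1 < p.2 then acc ++ [(String.ofList [p.1], p.2)] else acc) []

-- ===== PORT B =====
-- worklist round of Source B: take the first char, partition the rest into equals and others
def quantityAltGo (chars : List Char) : List (String × Int) :=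
  match chars with
  | [] => []
  | c :: rest =>
    let same := rest.filter (fun x => x == c)
    let others := rest.filter (fun x => !(x == c))
    (if !same.isEmpty then [(String.ofList [c], 1 + (same.length : Int))] else [])
      ++ quantityAltGo others
termination_by chars.length
decreasing_by
  simp
  exact le_trans (List.length_filter_le _ _) (le_of_eq (List.length_attach))

def quantity_alt (input_string : String) : List (String × Int) :=
  let chars := ((PySem.Str.lower input_string).toList).filter PySem.Chars.isalnum
  quantityAltGo chars

-- ===== PRECONDITION & SPEC =====
def Spec_quantity (input_string : String) (out : List (String × Int)) : Prop := out = quantity_alt input_string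
instance (input_string : String) (out : List (String × Int)) : Decidable (Spec_quantity input_string out) := by unfold Spec_quantity; infer_instance

-- ===== CLAIM (what is proved, stated in full; the proofs are below) =====
def Claim_equal_quantity : Prop := ∀ (input_string : String), Dom_quantity input_string → Spec_quantity input_string (quantity input_string)

-- ===== LEMMAS AND PROOFS =====

-- common normal form: distinct chars with a count > 1, first-occurrence order, with their counts
def quantityNF (l : List Char) : List (String × Int) :=
  ((PySem.Set.ofList l).filter (fun k => decide ((1 : Int) < (l.count k : Int)))).map
    (fun k => (String.ofList [k], (l.count k : Int)))

-- set-of-list commutes with filter (first-occurrence order preserved)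
theorem ofList_filter (p : Char → Bool) :
    ∀ t : List Char, PySem.Set.ofList (t.filter p) = (PySem.Set.ofList t).filter p := by
  intro t
  induction t with
  | nil => rfl
  | cons c t ih =>
    by_cases hp : p c = true
    · simp only [List.filter_cons, hp, if_true, PySem.Set.ofList_cons, PySem.Set.discard, ih,
        List.filter_comm]
    · have hp' : p c = false := by simpa using hp
      simp only [List.filter_cons, hp', Bool.false_eq_true, if_false, PySem.Set.ofList_cons,
        PySem.Set.discard, ih]
      rw [List.filter_comm]
      symm
      apply List.filter_eq_self.mpr
      intro y hy
      have hpy : p y = true := (List.mem_filter.mp hy).2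
      simp only [Bool.not_eq_eq_eq_not, Bool.not_true, beq_eq_false_iff_ne]
      intro h; subst h; rw [hpy] at hp'; cases hp'

theorem quantityAltGo_eq_NF : ∀ l : List Char, quantityAltGo l = quantityNF l := by
  intro l
  induction l using quantityAltGo.induct with
  | case1 => simp [quantityAltGo]; rfl
  | case2 c rest o ih =>
    rw [quantityAltGo]
    set same := rest.filter (fun x => x == c) with hsame_def
    set others := rest.filter (fun x => !(x == c)) with hothers_def
    have ho : o = others := by
      rw [hothers_def]
      have hfun : (fun x : {x // x ∈ rest} => match x with | ⟨x, _⟩ => !(x == c))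
          = (fun i : {x // x ∈ rest} => !(i.1 == c)) := by
        funext i; cases i; rfl
      show (List.filter (fun x : {x // x ∈ rest} => match x with | ⟨x, _⟩ => !(x == c))
        rest.attach).unattach = _
      rw [hfun, List.unattach_filter, List.unattach_attach]
      intro x h
      rfl
    rw [ho] at ih
    have hsame : same.length = rest.count c := by
      rw [hsame_def, ← List.countP_eq_length_filter]
      rfl
    have hothers_count : ∀ k, k ≠ c → others.count k = rest.count k := by
      intro k hk
      rw [hothers_def]
      exact List.count_filter (by simpa using hk)
    unfold quantityNF
    rw [PySem.Set.ofList_cons]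
    have hdisc : (PySem.Set.ofList rest).discard c = PySem.Set.ofList others := by
      rw [hothers_def, ofList_filter]
      rfl
    rw [hdisc]
    simp only [List.filter_cons]
    have hcount_c : (c :: rest).count c = rest.count c + 1 := List.count_cons_self
    have htail : List.map (fun k => (String.ofList [k], (List.count k (c :: rest) : Int)))
          (List.filter (fun k => decide ((1 : Int) < (List.count k (c :: rest) : Int)))
            (PySem.Set.ofList others))
        = quantityNF others := by
      unfold quantityNF
      have hfil : (PySem.Set.ofList others).filter
            (fun k => decide ((1 : Int) < ((List.count k (c :: rest) : Nat) : Int)))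
          = (PySem.Set.ofList others).filter
            (fun k => decide ((1 : Int) < ((others.count k : Nat) : Int))) := by
        apply List.filter_congr
        intro k hk
        have hkne : k ≠ c := by
          have h1 := (PySem.Set.mem_ofList others k).mp hk
          have h2 := (List.mem_filter.mp (hothers_def ▸ h1)).2
          simpa using h2
        rw [List.count_cons_of_ne (Ne.symm hkne), hothers_count k hkne]
      rw [hfil]
      apply List.map_congr_left
      intro k hk
      have hk' : k ∈ PySem.Set.ofList others := List.mem_of_mem_filter hk
      have hkne : k ≠ c := by
        have h1 := (PySem.Set.mem_ofList others k).mp hk'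
        have h2 := (List.mem_filter.mp (hothers_def ▸ h1)).2
        simpa using h2
      rw [List.count_cons_of_ne (Ne.symm hkne), hothers_count k hkne]
    by_cases hpos : 0 < rest.count c
    · have hsame_ne : same ≠ [] := by
        intro h; rw [h] at hsame; simp at hsame; omega
      have hne : (!same.isEmpty) = true := by simpa [List.isEmpty_iff] using hsame_ne
      have hgt : decide ((1 : Int) < ((List.count c (c :: rest) : Nat) : Int)) = true := by
        simp only [decide_eq_true_eq]
        rw [hcount_c]; push_cast; omega
      rw [if_pos hne, hgt, if_pos rfl, List.map_cons, ih, htail]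
      simp only [List.cons_append, List.nil_append]
      congr 2
      rw [hsame, hcount_c]; push_cast; ring
    · have hcnt0 : rest.count c = 0 := by omega
      have hsame_nil : same = [] := by
        rw [← List.length_eq_zero_iff, hsame, hcnt0]
      have hne : ¬ ((!same.isEmpty) = true) := by simp [hsame_nil]
      have hgt : decide ((1 : Int) < ((List.count c (c :: rest) : Nat) : Int)) = false := by
        rw [hcount_c, hcnt0]; simp
      rw [if_neg hne, hgt, if_neg (by simp), ih, htail]
      simp

theorem quantity_eq_NF (input_string : String) :
    quantity input_string =
      quantityNF (((PySem.Str.lower input_string).toList).filter PySem.Chars.isalnum) := by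
  unfold quantity
  simp only []
  set t := (PySem.Str.lower input_string).toList with ht
  set fl := t.filter PySem.Chars.isalnum with hfl
  have hstepA :
      (fun (d : PySem.Dict Char Int) c =>
        if PySem.Chars.isalnum c then
          if d.contains c then d.insert c (d.getD c 0 + 1) else d.insert c 1
        else d)
      = (fun d c => if PySem.Chars.isalnum c then d.insert c (d.getD c 0 + 1) else d) := by
    funext d c
    by_cases ha : PySem.Chars.isalnum c
    · by_cases hc : d.contains c
      · simp [ha, hc]
      · have : d.getD c 0 = 0 := PySem.Dict.getD_of_not_contains d 0 (by simpa using hc)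
        simp [ha, hc, this]
    · simp [ha]
  rw [hstepA, ← List.foldl_filter, ← hfl,
      PySem.Dict.foldl_insert_getD_add_one_eq_counter, PySem.Dict.items_counter]
  have hout : (fun (acc : List (String × Int)) (p : Char × Int) =>
      if 1 < p.2 then acc ++ [(String.ofList [p.1], p.2)] else acc)
      = (fun acc p => if (fun (p : Char × Int) => decide (1 < p.2)) p = true
          then acc ++ [(fun (p : Char × Int) => (String.ofList [p.1], p.2)) p] else acc) := by
    funext acc p; simp
  rw [hout, PySem.List.foldl_append_if]
  simp only [List.nil_append, List.filter_map, List.map_map]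
  unfold quantityNF
  rfl

-- ===== VERDICT (by name: the statement is the Claim_ definition above) =====
theorem quantity_spec : Claim_equal_quantity := by
  intro s _
  unfold Spec_quantity quantity_alt
  rw [quantity_eq_NF, quantityAltGo_eq_NF]
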